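-- pv_equiv track=rewrite | github.com/SyphonArch/DS-HW-tester | loader.py | sort_filenames
-- ===== SOURCE A (Python) =====
-- def txt_strip(filename):
--     """Strips the filename of the .txt extension."""
--     assert filename.endswith('.txt')
--     return filename[:-4]
--
-- def sort_filenames(filenames):
--     """Puts filenames with integer names first, then the rest are in string-sorted order."""
--     integer_filenames = []
--     non_integer_filenames = []
--     for filename in filenames:
--         filename_front = txt_strip(filename)
--         if filename_front.isdigit():
--             integer_filenames.append(filename)
--         else:
--             non_integer_filenames.append(filename)
--
--     integer_filenames.sort(key=lambda x: int(txt_strip(x)))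
--     non_integer_filenames.sort()
--     return integer_filenames + non_integer_filenames
-- ===== SOURCE B (Python) =====
-- def txt_strip(filename):
--     """Strips the filename of the .txt extension."""
--     assert filename.endswith('.txt')
--     return filename[:-4]
--
-- def sort_filenames(filenames):
--     """Puts filenames with integer names first, then the rest are in string-sorted order."""
--     def key(filename):
--         front = txt_strip(filename)
--         return (0, int(front)) if front.isdigit() else (1, filename)
--     return sorted(filenames, key=key)
-- ===== Notes on version B (the rewrite author's own statement) =====
-- stated objective: simpler
-- what changed: Replaces the partition-into-two-lists-and-two-sorts with one stable sorted() call over a composite key ((0,int(front)) for integer-named files, (1,filename) otherwise).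
import Mathlib
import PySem

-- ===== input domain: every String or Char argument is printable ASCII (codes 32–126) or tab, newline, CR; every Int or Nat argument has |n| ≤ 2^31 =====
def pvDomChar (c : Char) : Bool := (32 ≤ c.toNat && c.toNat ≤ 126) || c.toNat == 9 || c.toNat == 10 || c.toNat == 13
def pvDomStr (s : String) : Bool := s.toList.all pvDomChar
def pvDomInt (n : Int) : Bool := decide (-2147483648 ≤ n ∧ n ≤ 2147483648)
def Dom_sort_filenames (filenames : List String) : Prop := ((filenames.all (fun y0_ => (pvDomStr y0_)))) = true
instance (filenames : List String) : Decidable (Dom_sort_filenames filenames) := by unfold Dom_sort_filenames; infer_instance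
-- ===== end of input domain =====

-- B replaces A's partition-and-two-sorts by a single stable sort with a composite key (simpler decomposition; same O(n log n)/sort cost class).


-- ===== PORT A =====
-- txt_strip(filename) = filename[:-4] (the assert is reflected in Pre_ below: A raises AssertionError unless the name ends in '.txt')
def pvTxtStrip (filename : String) : String := PySem.Str.slice filename none (some (-4))

-- int(txt_strip(x)); under isdigit the parse succeeds (ASCII domain), .getD 0 only makes the port total
def pvIntKey (x : String) : Int := (PySem.Int.ofStr? (pvTxtStrip x)).getD 0

-- the body of A's partition loop, hoisted to a name
def pvPartStep (p : List String × List String) (filename : String) : List String × List String :=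
  let filename_front := pvTxtStrip filename
  if PySem.Str.strIsdigit filename_front then (p.1 ++ [filename], p.2)
  else (p.1, p.2 ++ [filename])

def sort_filenames (filenames : List String) : List String :=
  let p := filenames.foldl pvPartStep ([], [])
  PySem.List.sorted p.1 (fun x => pvIntKey x) false ++ PySem.List.sorted p.2 (fun x => x) false

-- ===== PORT B =====
-- Source B's key f = (0, int(front)) if front.isdigit() else (1, f); sorted(key=…) is ported in PySem's
-- insertion-sort form (sorted_eq_foldl_insertBy), with the tuple key's lexicographic '<' inlined as
-- pvKeyLt, because the key mixes (0,int) and (1,str) (groups never compare second components across).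
def pvKeyLt (a b : String) : Bool :=
  let fa := pvTxtStrip a
  let fb := pvTxtStrip b
  if PySem.Str.strIsdigit fa then
    if PySem.Str.strIsdigit fb then
      decide ((PySem.Int.ofStr? fa).getD 0 < (PySem.Int.ofStr? fb).getD 0)
    else true
  else
    if PySem.Str.strIsdigit fb then false
    else decide (a < b)

def sort_filenames_alt (filenames : List String) : List String :=
  filenames.foldl (fun acc x => PySem.List.insertBy pvKeyLt x acc) []

-- ===== PRECONDITION & SPEC =====
-- Pre_ excludes exactly the inputs where A raises (AssertionError in txt_strip for a name not ending in '.txt'); B raises there too.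
def Pre_sort_filenames (filenames : List String) : Prop :=
  (filenames.all (fun f => PySem.Str.endswith f ".txt")) = true
instance (filenames : List String) : Decidable (Pre_sort_filenames filenames) := by
  unfold Pre_sort_filenames; infer_instance
def pvWitness_sort_filenames : List String := ["10.txt", "b.txt", "2.txt", "a.txt"]

def Spec_sort_filenames (filenames : List String) (out : List String) : Prop := out = sort_filenames_alt filenames
instance (filenames : List String) (out : List String) : Decidable (Spec_sort_filenames filenames out) := by unfold Spec_sort_filenames; infer_instance

-- ===== CLAIM (what is proved, stated in full; the proofs are below) =====
def Claim_equal_sort_filenames : Prop := ∀ (filenames : List String), Dom_sort_filenames filenames → Pre_sort_filenames filenames → Spec_sort_filenames filenames (sort_filenames filenames)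

-- ===== LEMMAS AND PROOFS =====

-- the digit test on the stripped front, as used by both ports
def pvDig (f : String) : Bool := PySem.Str.strIsdigit (pvTxtStrip f)

lemma insertBy_append_of_all_lt {α : Type} (p : α → α → Bool) (x : α) (A B : List α)
    (h : ∀ b ∈ B, p x b = true) :
    PySem.List.insertBy p x (A ++ B) = PySem.List.insertBy p x A ++ B := by
  induction A with
  | nil =>
    cases B with
    | nil => rfl
    | cons b B' => simp [PySem.List.insertBy, h b (by simp)]
  | cons a A' ih =>
    simp only [List.cons_append, PySem.List.insertBy]
    by_cases hp : p x a = true <;> simp [hp, ih]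

lemma insertBy_append_of_all_not_lt {α : Type} (p : α → α → Bool) (x : α) (A B : List α)
    (h : ∀ a ∈ A, p x a = false) :
    PySem.List.insertBy p x (A ++ B) = A ++ PySem.List.insertBy p x B := by
  induction A with
  | nil => rfl
  | cons a A' ih =>
    simp only [List.cons_append, PySem.List.insertBy]
    rw [h a (by simp)]
    simp only [Bool.false_eq_true, if_false]
    rw [ih (fun a ha => h a (by simp [ha]))]

lemma insertBy_congr {α : Type} (p q : α → α → Bool) (x : α) (ys : List α)
    (h : ∀ y ∈ ys, p x y = q x y) :
    PySem.List.insertBy p x ys = PySem.List.insertBy q x ys := by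
  induction ys with
  | nil => rfl
  | cons y ys' ih =>
    simp only [PySem.List.insertBy, h y (by simp)]
    by_cases hq : q x y = true <;>
      simp [hq, ih (fun y hy => h y (by simp [hy]))]

-- the partition loop of A is the pair of filters
lemma pvPartStep_eq (p : List String × List String) (x : String) :
    pvPartStep p x = if pvDig x then (p.1 ++ [x], p.2) else (p.1, p.2 ++ [x]) := rfl

lemma partition_foldl (xs : List String) (a b : List String) :
    xs.foldl pvPartStep (a, b)
    = (a ++ xs.filter pvDig, b ++ xs.filter (fun f => !pvDig f)) := by
  induction xs generalizing a b with
  | nil => simp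
  | cons x xs' ih =>
    rw [List.foldl_cons, pvPartStep_eq]
    cases hx : pvDig x <;> simp [hx, ih]

-- the heart of the proof: the two-sorts-concatenated form equals the single composite-key insertion sort
lemma main_eq (xs : List String) :
    PySem.List.sorted (xs.filter pvDig) (fun x => pvIntKey x) false
      ++ PySem.List.sorted (xs.filter (fun f => !pvDig f)) (fun x => x) false
    = xs.foldl (fun acc x => PySem.List.insertBy pvKeyLt x acc) [] := by
  induction xs using List.reverseRecOn with
  | nil => rfl
  | append_singleton xs x ih =>
    rw [List.foldl_append, List.foldl_cons, List.foldl_nil, ← ih,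
        List.filter_append, List.filter_append]
    by_cases hx : pvDig x = true
    · have hfil : List.filter pvDig [x] = [x] := by simp [hx]
      have hfil2 : List.filter (fun f => !pvDig f) [x] = [] := by simp [hx]
      rw [hfil, hfil2, List.append_nil]
      rw [insertBy_append_of_all_lt pvKeyLt x _ _ (by
        intro b hb
        rw [PySem.List.mem_sorted] at hb
        have hb' : PySem.Chars.strIsdigit (pvTxtStrip b).toList = false := by
          have := List.of_mem_filter hb; simpa [pvDig] using this
        have hx2 : PySem.Chars.strIsdigit (pvTxtStrip x).toList = true := by
          simpa [pvDig] using hx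
        simp [pvKeyLt, hx2, hb'])]
      rw [insertBy_congr pvKeyLt (fun a b => decide (pvIntKey a < pvIntKey b)) x _ (by
        intro y hy
        rw [PySem.List.mem_sorted] at hy
        have hy' : PySem.Chars.strIsdigit (pvTxtStrip y).toList = true := by
          simpa [pvDig] using List.of_mem_filter hy
        have hx2 : PySem.Chars.strIsdigit (pvTxtStrip x).toList = true := by
          simpa [pvDig] using hx
        simp [pvKeyLt, pvIntKey, hx2, hy'])]
      rw [PySem.List.sorted_eq_foldl_insertBy (List.filter pvDig xs ++ [x]) (fun x => pvIntKey x),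
          List.foldl_append, List.foldl_cons, List.foldl_nil,
          ← PySem.List.sorted_eq_foldl_insertBy]
    · have hx' : pvDig x = false := by simpa using hx
      have hfil : List.filter pvDig [x] = [] := by simp [hx']
      have hfil2 : List.filter (fun f => !pvDig f) [x] = [x] := by simp [hx']
      rw [hfil, hfil2, List.append_nil]
      rw [insertBy_append_of_all_not_lt pvKeyLt x _ _ (by
        intro a ha
        rw [PySem.List.mem_sorted] at ha
        have ha' : PySem.Chars.strIsdigit (pvTxtStrip a).toList = true := by
          simpa [pvDig] using List.of_mem_filter ha
        have hx2 : PySem.Chars.strIsdigit (pvTxtStrip x).toList = false := by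
          simpa [pvDig] using hx'
        simp [pvKeyLt, hx2, ha'])]
      rw [insertBy_congr pvKeyLt (fun a b => decide (a < b)) x _ (by
        intro y hy
        rw [PySem.List.mem_sorted] at hy
        have hy' : PySem.Chars.strIsdigit (pvTxtStrip y).toList = false := by
          have := List.of_mem_filter hy; simpa [pvDig] using this
        have hx2 : PySem.Chars.strIsdigit (pvTxtStrip x).toList = false := by
          simpa [pvDig] using hx'
        simp [pvKeyLt, hx2, hy'])]
      rw [PySem.List.sorted_eq_foldl_insertBy (List.filter (fun f => !pvDig f) xs ++ [x]) (fun x => x),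
          List.foldl_append, List.foldl_cons, List.foldl_nil,
          ← PySem.List.sorted_eq_foldl_insertBy]

-- ===== VERDICT (by name: the statement is the Claim_ definition above) =====
theorem sort_filenames_spec : Claim_equal_sort_filenames := by
  intro filenames _ _
  unfold Spec_sort_filenames sort_filenames sort_filenames_alt
  rw [partition_foldl filenames [] []]
  simpa using main_eq filenames
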